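-- pv_equiv track=rewrite | github.com/kimmjen/SW-Expert | SW-Expert/DataStructure/Set/Set.py | process_set_operations
-- ===== SOURCE A (Python) =====
-- def process_set_operations(test_cases):
--     results = []
--     for case_index, commands in enumerate(test_cases):
--         result = [f"#{case_index + 1}"]
--         my_set = set()
--         for command in commands:
--             op_type = command[0]
--             value = command[1]
--             if op_type == 1:
--                 my_set.add(value)
--             elif op_type == 2:
--                 if value in my_set:
--                     my_set.remove(value)
--         sorted_elements = sorted(my_set)
--         result.extend(map(str, sorted_elements))
--         results.append(" ".join(result))
--
--     return results
-- ===== SOURCE B (Python) =====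
-- def process_set_operations(test_cases):
--     results = []
--     for i, commands in enumerate(test_cases, 1):
--         last = {}
--         for op, value in commands:
--             if op == 1 or op == 2:
--                 last[value] = op
--         members = sorted(v for v, op in last.items() if op == 1)
--         results.append(" ".join(["#%d" % i] + [str(v) for v in members]))
--     return results
-- ===== Notes on version B (the rewrite author's own statement) =====
-- stated objective: alternative
-- what changed: B replaces the eagerly mutated set with a single pass building a dict of each value's most recent add/remove command, then selects the values whose last command is an add, sorts them and joins.
import Mathlib
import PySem

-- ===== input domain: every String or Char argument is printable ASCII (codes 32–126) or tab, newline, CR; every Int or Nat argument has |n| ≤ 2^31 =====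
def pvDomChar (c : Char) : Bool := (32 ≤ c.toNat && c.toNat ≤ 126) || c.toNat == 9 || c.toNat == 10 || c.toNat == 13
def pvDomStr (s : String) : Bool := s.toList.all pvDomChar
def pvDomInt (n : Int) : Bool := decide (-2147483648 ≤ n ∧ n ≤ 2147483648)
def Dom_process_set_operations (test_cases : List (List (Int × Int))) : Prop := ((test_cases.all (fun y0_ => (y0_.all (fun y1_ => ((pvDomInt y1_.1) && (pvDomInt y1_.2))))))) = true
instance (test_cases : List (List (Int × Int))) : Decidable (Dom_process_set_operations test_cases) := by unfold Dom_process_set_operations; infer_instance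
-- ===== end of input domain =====

-- B keeps a dict of each value's last add/remove command and resolves membership at the end,
-- instead of A's eagerly mutated set; same cost, different data structure (objective: alternative).

-- ===== PORT A =====
-- one command applied to the live set (body of A's inner loop)
def pvAStep (my_set : PySem.Set Int) (command : Int × Int) : PySem.Set Int :=
  let op_type := command.1
  let value := command.2
  if op_type = 1 then my_set.add value
  else if op_type = 2 then (if my_set.contains value then my_set.discard value else my_set)
  else my_set

-- body of A's outer loop for one (case_index, commands)
def pvACase (case_index : Int) (commands : List (Int × Int)) : String :=
  let result : List String := ["#" ++ PySem.Int.toStr (case_index + 1)]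
  let my_set : PySem.Set Int := commands.foldl pvAStep (PySem.Set.ofList [])
  let sorted_elements := PySem.List.sorted my_set id
  PySem.Str.join " " (result ++ sorted_elements.map PySem.Int.toStr)

def process_set_operations (test_cases : List (List (Int × Int))) : List String :=
  (PySem.List.enumerate test_cases).foldl
    (fun results p => results ++ [pvACase p.1 p.2]) []

-- ===== PORT B =====
-- one command recorded in the last-op dict (body of B's inner loop)
def pvBStep (last : PySem.Dict Int Int) (c : Int × Int) : PySem.Dict Int Int :=
  if c.1 = 1 ∨ c.1 = 2 then last.insert c.2 c.1 else last

def pvLastOps (commands : List (Int × Int)) : PySem.Dict Int Int :=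
  commands.foldl pvBStep ⟨[]⟩

def pvBCase (i : Int) (commands : List (Int × Int)) : String :=
  let members := PySem.List.sorted
    (((pvLastOps commands).items.filter (fun p => p.2 == 1)).map Prod.fst) id
  PySem.Str.join " " (("#" ++ PySem.Int.toStr i) :: members.map PySem.Int.toStr)

def process_set_operations_alt (test_cases : List (List (Int × Int))) : List String :=
  (PySem.List.enumerate test_cases 1).map (fun p => pvBCase p.1 p.2)

-- ===== PRECONDITION & SPEC =====
def Spec_process_set_operations (test_cases : List (List (Int × Int))) (out : List String) : Prop := out = process_set_operations_alt test_cases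
instance (test_cases : List (List (Int × Int))) (out : List String) : Decidable (Spec_process_set_operations test_cases out) := by unfold Spec_process_set_operations; infer_instance

-- ===== CLAIM (what is proved, stated in full; the proofs are below) =====
def Claim_equal_process_set_operations : Prop := ∀ (test_cases : List (List (Int × Int))), Dom_process_set_operations test_cases → Spec_process_set_operations test_cases (process_set_operations test_cases)

-- ===== LEMMAS AND PROOFS =====

lemma pv_find_one (v : Int) (l : List (Int × Int)) (h : (l.map Prod.fst).Nodup) :
    Option.map Prod.snd (l.find? (fun p => p.1 == v)) = some 1 ↔ (v, (1:Int)) ∈ l := by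
  induction l with
  | nil => simp
  | cons p t ih =>
    obtain ⟨k, w⟩ := p
    simp only [List.map_cons, List.nodup_cons] at h
    by_cases hv : k = v
    · subst hv
      simp only [List.find?_cons, beq_self_eq_true, Option.map_some, List.mem_cons]
      constructor
      · intro hw; left; simp at hw; simp [hw]
      · rintro (he | ht)
        · exact (by simpa using he.symm)
        · exact absurd (List.mem_map_of_mem (f := Prod.fst) ht) (by simpa using h.1)
    · have hf : ((k, w).1 == v) = false := by simpa using hv
      simp only [List.find?_cons, hf, List.mem_cons]
      rw [ih h.2]
      constructor
      · exact Or.inr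
      · rintro (he | ht)
        · exact absurd (congrArg Prod.fst he).symm hv
        · exact ht

lemma pv_mem_filter_ones (l : List (Int × Int)) (h : (l.map Prod.fst).Nodup) (v : Int) :
    v ∈ (l.filter (fun p => p.2 == 1)).map Prod.fst ↔
      Option.map Prod.snd (l.find? (fun p => p.1 == v)) = some 1 := by
  rw [pv_find_one v l h]
  simp only [List.mem_map, List.mem_filter]
  constructor
  · rintro ⟨⟨a, b⟩, ⟨hm, hb⟩, hf⟩
    simp at hb hf; subst hf; subst hb; exact hm
  · intro hm; exact ⟨(v, 1), ⟨hm, by simp⟩, rfl⟩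

lemma pv_nodup_filter_ones (l : List (Int × Int)) (h : (l.map Prod.fst).Nodup) :
    ((l.filter (fun p => p.2 == 1)).map Prod.fst).Nodup :=
  (((List.filter_sublist (l := l)).map Prod.fst).nodup) h

lemma pv_step (s : PySem.Set Int) (d : PySem.Dict Int Int) (c : Int × Int)
    (hs : s.Nodup) (hd : d.keys.Nodup) (hrel : ∀ v : Int, v ∈ s ↔ d.get? v = some 1) :
    (pvAStep s c).Nodup ∧ (pvBStep d c).keys.Nodup ∧
      ∀ v : Int, v ∈ pvAStep s c ↔ (pvBStep d c).get? v = some 1 := by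
  obtain ⟨op, x⟩ := c
  by_cases h1 : op = 1
  · subst h1
    have hA : pvAStep s (1, x) = s.add x := by simp [pvAStep]
    have hB : pvBStep d (1, x) = d.insert x 1 := by simp [pvBStep]
    refine ⟨by rw [hA]; exact PySem.Set.nodup_add s x hs, ?_, ?_⟩
    · rw [hB]; exact PySem.Dict.nodup_keys_insert d x 1 hd
    · intro v
      rw [hA, hB, PySem.Set.mem_add, PySem.Dict.get?_insert]
      by_cases hv : v = x
      · simp [hv]
      · simp [hv, hrel v]
  · by_cases h2 : op = 2
    · subst h2
      have hA : pvAStep s (2, x) = if s.contains x then s.discard x else s := by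
        simp [pvAStep]
      have hB : pvBStep d (2, x) = d.insert x 2 := by
        simp [pvBStep]
      refine ⟨?_, ?_, ?_⟩
      · rw [hA]; split
        · exact PySem.Set.nodup_discard s x hs
        · exact hs
      · rw [hB]; exact PySem.Dict.nodup_keys_insert d x 2 hd
      · intro v
        rw [hA, hB, PySem.Dict.get?_insert]
        by_cases hv : v = x
        · subst hv
          rw [if_pos rfl]
          constructor
          · intro hm
            split at hm
            · exact absurd ((PySem.Set.mem_discard s v v).mp hm).2 (by simp)
            · rename_i hc
              exact absurd ((PySem.Set.contains_iff s v).mpr hm) hc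
          · intro h; simp at h
        · simp only [if_neg hv]
          rw [← hrel v]
          split
          · rw [PySem.Set.mem_discard]; exact ⟨fun h => h.1, fun h => ⟨h, hv⟩⟩
          · rfl
    · have hA : pvAStep s (op, x) = s := by simp [pvAStep, h1, h2]
      have hB : pvBStep d (op, x) = d := by simp [pvBStep, h1, h2]
      rw [hA, hB]; exact ⟨hs, hd, hrel⟩

lemma pv_inv (commands : List (Int × Int)) :
    ∀ (s : PySem.Set Int) (d : PySem.Dict Int Int),
      s.Nodup → d.keys.Nodup → (∀ v : Int, v ∈ s ↔ d.get? v = some 1) →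
      (commands.foldl pvAStep s).Nodup ∧ (commands.foldl pvBStep d).keys.Nodup ∧
        ∀ v : Int, v ∈ commands.foldl pvAStep s ↔ (commands.foldl pvBStep d).get? v = some 1 := by
  induction commands with
  | nil => intro s d hs hd hrel; exact ⟨hs, hd, hrel⟩
  | cons c t ih =>
    intro s d hs hd hrel
    obtain ⟨h1, h2, h3⟩ := pv_step s d c hs hd hrel
    simpa using ih (pvAStep s c) (pvBStep d c) h1 h2 h3

lemma pv_sorted_eq (commands : List (Int × Int)) :
    PySem.List.sorted (commands.foldl pvAStep (PySem.Set.ofList [])) id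
      = PySem.List.sorted (((pvLastOps commands).items.filter (fun p => p.2 == 1)).map Prod.fst) id := by
  obtain ⟨hs, hd, hrel⟩ := pv_inv commands (PySem.Set.ofList []) ⟨[]⟩
    (by simp [PySem.Set.ofList]) (by simp [PySem.Dict.keys])
    (by intro v; simp [PySem.Set.ofList, PySem.Dict.get?])
  set s' := commands.foldl pvAStep (PySem.Set.ofList []) with hs'
  set d' := commands.foldl pvBStep (⟨[]⟩ : PySem.Dict Int Int) with hd'
  have hdk : (d'.items.map Prod.fst).Nodup := hd
  have hmem : ∀ v : Int, v ∈ s' ↔ v ∈ (d'.items.filter (fun p => p.2 == 1)).map Prod.fst := by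
    intro v
    rw [hrel v, pv_mem_filter_ones d'.items hdk v]
    rfl
  have hnodup2 : ((d'.items.filter (fun p => p.2 == 1)).map Prod.fst).Nodup :=
    pv_nodup_filter_ones d'.items hdk
  -- both are nodup lists with the same members, hence permutations; sorted results agree
  have hperm : s'.Perm ((d'.items.filter (fun p => p.2 == 1)).map Prod.fst) := by
    rw [List.perm_ext_iff_of_nodup hs hnodup2]
    exact hmem
  have hys := PySem.List.sorted_perm s' id false
  have hpw : List.Pairwise (fun a b => id a < id b) (PySem.List.sorted s' id) := by
    have hle := PySem.List.sorted_pairwise s' id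
    have hnd : (PySem.List.sorted s' id).Nodup := hys.symm.nodup hs
    exact (hle.and hnd).imp (fun h => lt_of_le_of_ne h.1 h.2)
  have := PySem.List.sorted_eq_of_perm_of_pairwise_lt
    ((d'.items.filter (fun p => p.2 == 1)).map Prod.fst) (PySem.List.sorted s' id) id
    (hys.trans hperm) hpw
  rw [pvLastOps, ← hd', this]

lemma pv_case_eq (i : Int) (commands : List (Int × Int)) :
    pvACase i commands = pvBCase (i + 1) commands := by
  simp only [pvACase, pvBCase, pv_sorted_eq commands]
  rfl

lemma pv_outer (xs : List (List (Int × Int))) :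
    ∀ (k : Int) (acc : List String),
      (PySem.List.enumerate xs k).foldl (fun results p => results ++ [pvACase p.1 p.2]) acc
        = acc ++ (PySem.List.enumerate xs (k + 1)).map (fun p => pvBCase p.1 p.2) := by
  induction xs with
  | nil => intro k acc; simp [PySem.List.enumerate]
  | cons x t ih =>
    intro k acc
    rw [show PySem.List.enumerate (x :: t) k = (k, x) :: PySem.List.enumerate t (k + 1) from rfl,
      show PySem.List.enumerate (x :: t) (k + 1) = (k + 1, x) :: PySem.List.enumerate t (k + 1 + 1) from rfl,
      List.foldl_cons, List.map_cons, ih (k + 1) (acc ++ [pvACase k x]), pv_case_eq]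
    simp

-- ===== VERDICT (by name: the statement is the Claim_ definition above) =====
theorem process_set_operations_spec : Claim_equal_process_set_operations := by
  intro tc _
  unfold Spec_process_set_operations process_set_operations process_set_operations_alt
  simpa using pv_outer tc 0 []
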